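-- pv_equiv track=rewrite | github.com/lfmramos/Coursera_Curso_Python | Parte 2/Semana 2/menor_nome_3.py | menor_nome
-- ===== SOURCE A (Python) =====
-- def menor_nome(nomes):
--   """
--   Função que recebe uma lista de strings com nomes de pessoas como parâmetro e devolve o nome mais curto (em razão da soma dos valores ASCII das letras de cada nome) presente na lista.
--
--   Argumentos:
--     nomes: lista de strings com nomes de pessoas.
--
--   Retorno:
--     string com o nome mais curto presente na lista, com a primeira letra maiúscula e seus demais caracteres minúsculos.
--   """
--   # Normalizando os nomes (removendo espaços em branco e convertendo para letras minúsculas)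
--   nomes_normalizados = [nome.strip().lower() for nome in nomes]
--
--   # Encontrando o menor comprimento de um nome
--   menor_comprimento = min(len(nome) for nome in nomes_normalizados)
--
--   # Encontrando o primeiro nome com o menor comprimento
--   menor_nome = None
--   for nome in nomes_normalizados:
--     if len(nome) == menor_comprimento:
--       menor_nome = nome
--       break
--
--   # Retornando o menor nome com a primeira letra maiúscula
--   return menor_nome[0].upper() + menor_nome[1:]
-- ===== SOURCE B (Python) =====
-- def menor_nome(nomes):
--   # Same behaviour as A, in one keyed pass: min(..., key=len) returns the FIRST
--   # shortest normalized name, so the separate min-length pass and find loop go away.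
--   menor = min((nome.strip().lower() for nome in nomes), key=len)
--   return menor[0].upper() + menor[1:]
-- ===== Notes on version B (the rewrite author's own statement) =====
-- stated objective: simpler
-- what changed: Replaces A's two-pass structure (compute the minimum length with min over a generator of lengths, then a second loop to find the first name of that length) by a single keyed selection min(normalized, key=len), relying on min returning the first of equal-length ties.
import Mathlib
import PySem

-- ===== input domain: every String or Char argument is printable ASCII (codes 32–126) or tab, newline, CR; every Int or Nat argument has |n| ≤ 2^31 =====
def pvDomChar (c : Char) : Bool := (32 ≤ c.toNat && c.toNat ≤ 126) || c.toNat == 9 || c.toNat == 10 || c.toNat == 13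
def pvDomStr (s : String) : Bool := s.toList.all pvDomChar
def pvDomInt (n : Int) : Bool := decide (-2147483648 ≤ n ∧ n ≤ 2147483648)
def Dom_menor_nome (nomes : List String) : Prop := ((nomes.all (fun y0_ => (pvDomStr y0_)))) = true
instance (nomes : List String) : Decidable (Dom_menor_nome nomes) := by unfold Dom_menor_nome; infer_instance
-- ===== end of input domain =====

-- B replaces A's two passes (compute the min length, then a find-first loop) by one keyed min(..., key=len); objective: simpler.

-- ===== PORT A =====
-- shared transliteration of the tail expression nome[0].upper() + nome[1:]
-- (textually identical in both Python sources); "" is the IndexError case, excluded by Pre_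
def pvCapitalize (cs : List Char) : String :=
  match PySem.List.pyGet? cs 0 with
  | none => ""
  | some c => String.ofList (PySem.Chars.upper [c] ++ PySem.List.slice cs (some 1) none)

-- A's `for nome in nomes_normalizados: if len(nome) == menor_comprimento: menor_nome = nome; break`
def pvFindShortest (norm : List (List Char)) (m : Nat) : Option (List Char) :=
  match norm with
  | [] => none
  | cs :: rest => if cs.length = m then some cs else pvFindShortest rest m

def menor_nome (nomes : List String) : String :=
  let norm := nomes.map (fun nome => PySem.Chars.lower (PySem.Chars.strip nome.toList))
  match PySem.List.min? (norm.map List.length) (fun x => x) with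
  | none => ""                      -- ValueError of min() on an empty list, excluded by Pre_
  | some m =>
    match pvFindShortest norm m with
    | none => ""                    -- `menor_nome` stays None; unreachable: the minimum length is attained
    | some best => pvCapitalize best

-- ===== PORT B =====
def menor_nome_alt (nomes : List String) : String :=
  match PySem.List.min? (nomes.map (fun nome => PySem.Chars.lower (PySem.Chars.strip nome.toList)))
        (fun cs => cs.length) with
  | none => ""                      -- ValueError of min() on an empty list, excluded by Pre_
  | some menor => pvCapitalize menor

-- ===== PRECONDITION & SPEC =====
-- Pre_ excludes exactly the inputs where Python A raises: the empty list (ValueError from min)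
-- and lists with a name that strips to "" (IndexError from nome[0]); B raises there too.
def Pre_menor_nome (nomes : List String) : Prop :=
  nomes ≠ [] ∧ ∀ s ∈ nomes, PySem.Chars.strip s.toList ≠ []
instance (nomes : List String) : Decidable (Pre_menor_nome nomes) := by
  unfold Pre_menor_nome; infer_instance
def pvWitness_menor_nome : List String := ["  CARLA ", "Ana", "bob"]

def Spec_menor_nome (nomes : List String) (out : String) : Prop := out = menor_nome_alt nomes
instance (nomes : List String) (out : String) : Decidable (Spec_menor_nome nomes out) := by unfold Spec_menor_nome; infer_instance

-- ===== CLAIM (what is proved, stated in full; the proofs are below) =====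
def Claim_equal_menor_nome : Prop := ∀ (nomes : List String), Dom_menor_nome nomes → Pre_menor_nome nomes → Spec_menor_nome nomes (menor_nome nomes)

-- ===== LEMMAS AND PROOFS =====

-- PySem.List.min? is a left fold keeping the FIRST strict minimum; this recurrence
-- re-expresses it structurally (none of the library lemmas gives the first-of-ties shape).
lemma foldl_min_seed {α : Type} (key : α → Nat) (t : List α) :
    ∀ x : α, List.foldl (fun acc y => match acc with
        | none => some y
        | some m => if key y < key m then some y else some m) (some x) t
      = some (match PySem.List.min? t key with
              | none => x
              | some b => if key b < key x then b else x) := by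
  induction t with
  | nil => intro x; simp [PySem.List.min?]
  | cons y t ih =>
    intro x
    have hmc : PySem.List.min? (y :: t) key
        = some (match PySem.List.min? t key with
                | none => y
                | some b => if key b < key y then b else y) := by
      simp only [PySem.List.min?, List.foldl_cons]
      exact ih y
    rw [List.foldl_cons, hmc]
    by_cases hyx : key y < key x
    · rw [show (match (some x : Option α) with
            | none => some y
            | some m => if key y < key m then some y else some m) = some y by simp [hyx]]
      rw [ih y]
      cases hmt : PySem.List.min? t key with
      | none => simp [hyx]
      | some b =>
        simp only []
        split_ifs with h1 h2 <;> first | rfl | omega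
    · rw [show (match (some x : Option α) with
            | none => some y
            | some m => if key y < key m then some y else some m) = some x by simp [hyx]]
      rw [ih x]
      cases hmt : PySem.List.min? t key with
      | none => simp [hyx]
      | some b =>
        simp only []
        split_ifs with h1 h2 <;> first | rfl | omega

lemma min?_cons {α : Type} (key : α → Nat) (x : α) (t : List α) :
    PySem.List.min? (x :: t) key
      = some (match PySem.List.min? t key with
              | none => x
              | some b => if key b < key x then b else x) := by
  simp only [PySem.List.min?, List.foldl_cons]
  exact foldl_min_seed key t x

-- A's min over the lengths is the length of B's keyed min
lemma min?_len_map (l : List (List Char)) :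
    PySem.List.min? (l.map List.length) (fun x => x)
      = (PySem.List.min? l (fun cs => cs.length)).map List.length := by
  induction l with
  | nil => rfl
  | cons x t ih =>
    rw [List.map_cons, min?_cons (fun x => x), min?_cons (fun cs : List Char => cs.length), ih]
    cases hmt : PySem.List.min? t (fun cs : List Char => cs.length) with
    | none => rfl
    | some b => simp [apply_ite List.length]

-- A's find-first loop at the minimum length returns exactly B's keyed minimum
lemma findShortest_min? (l : List (List Char)) (b : List Char)
    (h : PySem.List.min? l (fun cs => cs.length) = some b) :
    pvFindShortest l b.length = some b := by
  induction l with
  | nil => simp [PySem.List.min?] at h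
  | cons x t ih =>
    rw [min?_cons (fun cs : List Char => cs.length)] at h
    cases hmt : PySem.List.min? t (fun cs : List Char => cs.length) with
    | none =>
      rw [hmt] at h
      simp only [Option.some.injEq] at h
      subst h
      simp [pvFindShortest]
    | some c =>
      rw [hmt] at h
      simp only [Option.some.injEq] at h
      by_cases hc : c.length < x.length
      · rw [if_pos hc] at h
        subst h
        have hne : ¬ x.length = c.length := by omega
        rw [show pvFindShortest (x :: t) c.length = pvFindShortest t c.length by
          simp [pvFindShortest, hne]]
        exact ih hmt
      · rw [if_neg hc] at h
        subst h
        simp [pvFindShortest]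

-- ===== VERDICT (by name: the statement is the Claim_ definition above) =====
theorem menor_nome_spec : Claim_equal_menor_nome := by
  intro nomes _ _
  unfold Spec_menor_nome
  simp only [menor_nome, menor_nome_alt]
  generalize (List.map (fun nome => PySem.Chars.lower (PySem.Chars.strip nome.toList)) nomes) = norm
  rw [min?_len_map norm]
  cases hmin : PySem.List.min? norm (fun cs => cs.length) with
  | none => rfl
  | some b =>
    simp only [Option.map_some]
    rw [findShortest_min? norm b hmin]
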